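-- pv_equiv track=rewrite | github.com/ieasybooks/quran-detector | src/quran_detector/records.py | _get_start_index
-- ===== SOURCE A (Python) =====
-- def _get_start_index(t1: str, t2: str, n_orig: str) -> int:
--     n_tokens = n_orig.split()
--     cnt = n_tokens.count(t1)
--     if cnt < 1:
--         return -1
--     if cnt == 1:
--         return n_tokens.index(t1)
--     offset = 0
--     for _ in range(cnt):
--         i1 = n_tokens[offset:].index(t1) + offset
--         if (i1 + 1) < len(n_tokens) and n_tokens[i1 + 1] == t2:
--             return i1
--         offset = i1 + 1
--     return -1
-- ===== SOURCE B (Python) =====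
-- def _get_start_index(t1: str, t2: str, n_orig: str) -> int:
--     tokens = n_orig.split()
--     idxs = [i for i, tok in enumerate(tokens) if tok == t1]
--     if not idxs:
--         return -1
--     if len(idxs) == 1:
--         return idxs[0]
--     for i in idxs:
--         if i + 1 < len(tokens) and tokens[i + 1] == t2:
--             return i
--     return -1
-- ===== Notes on version B (the rewrite author's own statement) =====
-- stated objective: alternative
-- what changed: A repeatedly slices the token list and calls .index with a moving offset; B builds the list of all positions of t1 once with a single enumerate comprehension and then makes one pass over that index table (keeping A's single-occurrence branch that returns the index without checking t2).
import Mathlib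
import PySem

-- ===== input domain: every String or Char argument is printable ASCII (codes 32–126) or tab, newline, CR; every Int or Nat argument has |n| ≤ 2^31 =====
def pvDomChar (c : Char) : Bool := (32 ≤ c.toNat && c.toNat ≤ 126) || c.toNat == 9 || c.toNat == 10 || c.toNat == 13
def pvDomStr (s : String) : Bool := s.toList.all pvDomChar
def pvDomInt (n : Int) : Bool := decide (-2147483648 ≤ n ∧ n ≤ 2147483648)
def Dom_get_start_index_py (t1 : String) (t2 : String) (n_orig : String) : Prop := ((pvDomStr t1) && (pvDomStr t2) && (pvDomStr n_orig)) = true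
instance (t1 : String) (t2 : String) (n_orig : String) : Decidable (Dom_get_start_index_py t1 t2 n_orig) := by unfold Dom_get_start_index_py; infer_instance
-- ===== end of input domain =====

-- B replaces A's repeated slice-and-.index scanning by one precomputed list of t1's
-- positions and a single pass over it (objective: alternative decomposition, not faster).

-- ===== PORT A =====
-- A's 'for _ in range(cnt)' loop; offset is a nonnegative Python int, kept as Nat, so the
-- slice n_tokens[offset:] is List.drop offset (PySem.List.slice_from_natCast); the 'none'
-- branch of index? (Python's ValueError) is unreachable here, -1 is a mere placeholder.
def aLoop (ts : List String) (t1 t2 : String) : Nat → Nat → Int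
  | 0, _ => -1
  | fuel + 1, offset =>
    match PySem.List.index? (ts.drop offset) t1 with
    | none => -1
    | some j =>
      let i1 := j + offset
      if i1 + 1 < ts.length ∧ ts.getD (i1 + 1) "" = t2 then (i1 : Int)
      else aLoop ts t1 t2 fuel (i1 + 1)

def get_start_index_py (t1 : String) (t2 : String) (n_orig : String) : Int :=
  let n_tokens := PySem.Str.split₀ n_orig
  let cnt := PySem.List.count n_tokens t1
  if cnt < 1 then -1
  else if cnt = 1 then
    -- n_tokens.index(t1); the ValueError branch is unreachable since cnt = 1
    match PySem.List.index? n_tokens t1 with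
    | some i => (i : Int)
    | none => -1
  else aLoop n_tokens t1 t2 cnt 0

-- ===== PORT B =====
-- B's 'for i in idxs' loop
def bFind (ts : List String) (t2 : String) : List Int → Int
  | [] => -1
  | i :: rest =>
    if i + 1 < (ts.length : Int) ∧ PySem.List.pyGetD ts (i + 1) "" = t2 then i
    else bFind ts t2 rest

def get_start_index_py_alt (t1 : String) (t2 : String) (n_orig : String) : Int :=
  let tokens := PySem.Str.split₀ n_orig
  let idxs := ((PySem.List.enumerate tokens).filter (fun p => p.2 = t1)).map (·.1)
  match idxs with
  | [] => -1
  | [i] => i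
  | _ => bFind tokens t2 idxs

-- ===== PRECONDITION & SPEC =====
def Spec_get_start_index_py (t1 : String) (t2 : String) (n_orig : String) (out : Int) : Prop := out = get_start_index_py_alt t1 t2 n_orig
instance (t1 : String) (t2 : String) (n_orig : String) (out : Int) : Decidable (Spec_get_start_index_py t1 t2 n_orig out) := by unfold Spec_get_start_index_py; infer_instance

-- ===== CLAIM (what is proved, stated in full; the proofs are below) =====
def Claim_equal_get_start_index_py : Prop := ∀ (t1 : String) (t2 : String) (n_orig : String), Dom_get_start_index_py t1 t2 n_orig → Spec_get_start_index_py t1 t2 n_orig (get_start_index_py t1 t2 n_orig)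

-- ===== LEMMAS AND PROOFS =====

-- occurrence positions of t in l, in increasing order (proof-only bridge between the two ports)
def occ (l : List String) (t : String) : List Nat :=
  match l with
  | [] => []
  | x :: xs => if x = t then 0 :: (occ xs t).map (· + 1) else (occ xs t).map (· + 1)

theorem occ_count (l : List String) (t : String) :
    PySem.List.count l t = (occ l t).length := by
  rw [PySem.List.count_eq]
  induction l with
  | nil => rfl
  | cons x xs ih =>
    by_cases h : x = t
    · simp [occ, h, ih]
    · simp [occ, h, ih]

theorem occ_index? (l : List String) (t : String) :
    PySem.List.index? l t = (occ l t).head? := by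
  induction l with
  | nil => rfl
  | cons x xs ih =>
    by_cases h : x = t
    · subst h; rw [PySem.List.index?_cons_self]; simp [occ]
    · rw [PySem.List.index?_cons_of_ne xs h, ih]
      simp [occ, h, List.head?_map]

theorem occ_enum (l : List String) (t : String) : ∀ s : Int,
    ((PySem.List.enumerate l s).filter (fun p => p.2 = t)).map (·.1)
      = (occ l t).map (fun (n : Nat) => (n : Int) + s) := by
  induction l with
  | nil => intro s; rfl
  | cons x xs ih =>
    intro s
    have key : (occ xs t).map (fun (n : Nat) => (n : Int) + (s + 1))
        = ((occ xs t).map (· + 1)).map (fun (n : Nat) => (n : Int) + s) := by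
      rw [List.map_map]
      apply List.map_congr_left; intro n _
      show (n : Int) + (s + 1) = ((n + 1 : Nat) : Int) + s
      push_cast; ring
    rw [PySem.List.enumerate_cons, List.filter_cons]
    by_cases h : x = t
    · simp only [occ, if_pos h]
      have hc : (decide ((s, x).2 = t)) = true := by simp [h]
      rw [hc, if_pos rfl]
      simp only [List.map_cons]
      rw [ih (s + 1), key]
      simp
    · simp only [occ, if_neg h]
      have hc : (decide ((s, x).2 = t)) = false := by simp [h]
      rw [hc, if_neg Bool.false_ne_true]
      rw [ih (s + 1), key]

theorem occ_drop (t : String) : ∀ (k : Nat) (l : List String),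
    (occ (l.drop k) t).map (· + k) = (occ l t).filter (fun i => decide (k ≤ i)) := by
  intro k
  induction k with
  | zero =>
    intro l
    rw [List.filter_eq_self.2 (fun a _ => by simp)]
    simp
  | succ k ih =>
    intro l
    cases l with
    | nil => rfl
    | cons x xs =>
      have key : ((occ xs t).map (· + 1)).filter (fun i => decide (k + 1 ≤ i))
          = (occ (xs.drop k) t).map (· + (k + 1)) := by
        rw [List.filter_map]
        have hf : ((fun i => decide (k + 1 ≤ i)) ∘ (· + 1)) = (fun i : Nat => decide (k ≤ i)) := by
          funext a; simp
        rw [hf, ← ih xs, List.map_map]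
        apply List.map_congr_left; intro n _; show n + k + 1 = n + (k + 1); omega
      by_cases h : x = t
      · simp only [List.drop_succ_cons, occ, if_pos h, List.filter_cons]
        rw [if_neg (by simp)]
        exact key.symm
      · simp only [List.drop_succ_cons, occ, if_neg h]
        exact key.symm

theorem occ_pairwise (l : List String) (t : String) : (occ l t).Pairwise (· < ·) := by
  induction l with
  | nil => exact List.Pairwise.nil
  | cons x xs ih =>
    by_cases h : x = t
    · simp only [occ, if_pos h]
      refine List.Pairwise.cons ?_ ?_
      · intro n hn; simp [List.mem_map] at hn; omega
      · rw [List.pairwise_map]; exact ih.imp (by omega)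
    · simp only [occ, if_neg h]
      rw [List.pairwise_map]; exact ih.imp (by omega)

theorem filter_step {os rest : List Nat} {a i : Nat} (hp : os.Pairwise (· < ·))
    (h : os.filter (fun j => decide (a ≤ j)) = i :: rest) :
    os.filter (fun j => decide (i + 1 ≤ j)) = rest := by
  induction os with
  | nil => simp at h
  | cons x xs ih =>
    rw [List.filter_cons] at h ⊢
    have hall : ∀ y ∈ xs, x < y := fun y hy => (List.pairwise_cons.1 hp).1 y hy
    by_cases hax : a ≤ x
    · rw [if_pos (by simpa using hax)] at h
      obtain ⟨hxi, hrest⟩ : x = i ∧ xs.filter (fun j => decide (a ≤ j)) = rest := by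
        constructor
        · exact (List.cons.injEq .. ▸ h).1
        · exact (List.cons.injEq .. ▸ h).2
      subst hxi
      rw [if_neg (by simp)]
      rw [← hrest]
      have e1 : xs.filter (fun j => decide (a ≤ j)) = xs :=
        List.filter_eq_self.2 (fun y hy => by simp; have := hall y hy; omega)
      have e2 : xs.filter (fun j => decide (x + 1 ≤ j)) = xs :=
        List.filter_eq_self.2 (fun y hy => by simp; have := hall y hy; omega)
      rw [e1, e2]
    · rw [if_neg (by simpa using hax)] at h
      have hi : a ≤ i := by
        have : i ∈ xs.filter (fun j => decide (a ≤ j)) := by rw [h]; simp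
        simpa using (List.of_mem_filter this)
      rw [if_neg (by simp; omega)]
      exact ih (List.pairwise_cons.1 hp).2 h

-- A's scan over the remaining occurrences = B's pass over the precomputed index list
theorem loop_eq (ts : List String) (t1 t2 : String) :
    ∀ (os : List Nat) (fuel offset : Nat),
      (occ ts t1).filter (fun j => decide (offset ≤ j)) = os →
      os.length ≤ fuel →
      aLoop ts t1 t2 fuel offset = bFind ts t2 (os.map (fun (n : Nat) => (n : Int))) := by
  intro os
  induction os with
  | nil =>
    intro fuel offset h _
    cases fuel with
    | zero => rfl
    | succ f =>
      have hd : occ (ts.drop offset) t1 = [] := by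
        have hh := occ_drop t1 offset ts
        rw [h] at hh
        exact List.map_eq_nil_iff.1 hh
      have hidx : PySem.List.index? (ts.drop offset) t1 = none := by
        rw [occ_index?, hd]; rfl
      simp only [aLoop, hidx]
      rfl
  | cons i rest ih =>
    intro fuel offset h hlen
    cases fuel with
    | zero => simp at hlen
    | succ f =>
      have hd := occ_drop t1 offset ts
      rw [h] at hd
      obtain ⟨j, rest', hocc, hji, hrest'⟩ :
          ∃ j rest', occ (ts.drop offset) t1 = j :: rest' ∧ j + offset = i ∧
            rest'.map (· + offset) = rest := by
        cases hocc : occ (ts.drop offset) t1 with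
        | nil => rw [hocc] at hd; simp at hd
        | cons j rest' =>
          rw [hocc] at hd; simp at hd
          exact ⟨j, rest', rfl, hd.1, hd.2⟩
      have hidx : PySem.List.index? (ts.drop offset) t1 = some j := by
        rw [occ_index?, hocc]; rfl
      simp only [aLoop, hidx]
      have hcond : ((j + offset) + 1 < ts.length ∧ ts.getD ((j + offset) + 1) "" = t2)
          ↔ ((i : Int) + 1 < (ts.length : Int) ∧ PySem.List.pyGetD ts ((i : Int) + 1) "" = t2) := by
        have hc : ((i : Int) + 1) = ((i + 1 : Nat) : Int) := by push_cast; ring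
        rw [hc, PySem.List.pyGetD_natCast]
        subst hji
        constructor
        · rintro ⟨h1, h2⟩; exact ⟨by exact_mod_cast h1, h2⟩
        · rintro ⟨h1, h2⟩; exact ⟨by exact_mod_cast h1, h2⟩
      simp only [List.map_cons, bFind]
      by_cases hc : (i : Int) + 1 < (ts.length : Int) ∧ PySem.List.pyGetD ts ((i : Int) + 1) "" = t2
      · rw [if_pos hc, if_pos (hcond.2 hc)]
        exact_mod_cast congrArg (fun (n : Nat) => (n : Int)) hji
      · rw [if_neg hc, if_neg (fun hh => hc (hcond.1 hh))]
        have hstep : (occ ts t1).filter (fun j => decide (i + 1 ≤ j)) = rest :=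
          filter_step (occ_pairwise ts t1) h
        rw [hji]
        exact ih f (i + 1) hstep (by simp at hlen ⊢; omega)

-- ===== VERDICT (by name: the statement is the Claim_ definition above) =====
theorem get_start_index_py_spec : Claim_equal_get_start_index_py := by
  intro t1 t2 n_orig _
  unfold Spec_get_start_index_py
  simp only [get_start_index_py, get_start_index_py_alt]
  set ts := PySem.Str.split₀ n_orig with hts
  have henum : ((PySem.List.enumerate ts).filter (fun p => p.2 = t1)).map (·.1)
      = (occ ts t1).map (fun (n : Nat) => (n : Int)) := by
    have hh := occ_enum ts t1 0
    simpa using hh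
  rw [henum, occ_count]
  cases hocc : occ ts t1 with
  | nil => simp
  | cons i rest =>
    cases rest with
    | nil =>
      have hidx : PySem.List.index? ts t1 = some i := by rw [occ_index?, hocc]; rfl
      rw [PySem.List.index?_eq_idxOf?] at hidx
      simp [hidx]
    | cons j rest' =>
      have hlen : ¬ ((i :: j :: rest').length < 1) := by simp
      have hne : ¬ ((i :: j :: rest').length = 1) := by simp
      rw [if_neg hlen, if_neg hne]
      have h0 : (occ ts t1).filter (fun j => decide (0 ≤ j)) = i :: j :: rest' := by
        rw [List.filter_eq_self.2 (fun a _ => by simp), hocc]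
      have hle := loop_eq ts t1 t2 (i :: j :: rest') (i :: j :: rest').length 0 h0 le_rfl
      simpa using hle
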